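-- pv_equiv track=rewrite | github.com/0mao0/AnGIneer | tools/check_architecture_docs.py | find_top_level_section
-- ===== SOURCE A (Python) =====
-- from typing import Dict, Iterable, List, Optional
--
-- def find_top_level_section(lines: List[str], section_name: str) -> tuple[int, int]:
--     start = -1
--     for index, line in enumerate(lines):
--         if line.strip() == f"{section_name}:" and not line.startswith(" "):
--             start = index + 1
--             break
--     if start < 0:
--         raise ValueError(f"architecture-map.yaml 缺少顶层段落: {section_name}")
--     end = len(lines)
--     for index in range(start, len(lines)):
--         line = lines[index]
--         if line and not line.startswith(" ") and line.endswith(":"):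
--             end = index
--             break
--     return start, end
-- ===== SOURCE B (Python) =====
-- def find_top_level_section(lines, section_name):
--     header = f"{section_name}:"
--     next_boundary = len(lines)
--     result = None
--     for i in range(len(lines) - 1, -1, -1):
--         line = lines[i]
--         if not line.startswith(" ") and line.strip() == header:
--             result = (i + 1, next_boundary)
--         if line and not line.startswith(" ") and line.endswith(":"):
--             next_boundary = i
--     if result is None:
--         raise ValueError(f"architecture-map.yaml 缺少顶层段落: {section_name}")
--     return result
-- ===== Notes on version B (the rewrite author's own statement) =====
-- stated objective: alternative
-- what changed: Replaces A's two forward break-loops (find header, then scan forward for the next boundary) with a single reverse pass that maintains the nearest following top-level boundary as an accumulator and records (header_index+1, that boundary) whenever a header line is seen, the last (leftmost) such record winning.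
import Mathlib
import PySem

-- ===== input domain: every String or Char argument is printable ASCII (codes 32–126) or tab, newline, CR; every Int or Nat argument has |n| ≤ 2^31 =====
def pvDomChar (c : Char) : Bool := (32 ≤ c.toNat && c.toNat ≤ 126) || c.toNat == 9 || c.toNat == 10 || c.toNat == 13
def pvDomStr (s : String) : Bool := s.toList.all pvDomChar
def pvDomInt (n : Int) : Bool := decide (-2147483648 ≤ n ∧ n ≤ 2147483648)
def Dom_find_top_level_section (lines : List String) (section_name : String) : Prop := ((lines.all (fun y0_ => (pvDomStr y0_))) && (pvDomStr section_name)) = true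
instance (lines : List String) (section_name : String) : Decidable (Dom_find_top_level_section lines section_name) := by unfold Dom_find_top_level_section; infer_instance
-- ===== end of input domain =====

-- B replaces A's two forward break-loops with a single reverse pass that carries the nearest
-- following top-level boundary as an accumulator (objective: alternative decomposition).

-- ===== PORT A =====
-- first loop of A: scan enumerate(lines), break with index+1 on the header line, else fall through to -1
def aStart (section_name : String) : List (Int × String) → Int
  | [] => -1
  | (i, line) :: rest =>
    if (PySem.Str.strip line == section_name ++ ":") && !(PySem.Str.startswith line " ")
    then i + 1 else aStart section_name rest

-- second loop of A: for index in range(start, len(lines)), break on a boundary line, else end = len(lines)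
def aEnd (lines : List String) : List Int → Int
  | [] => PySem.List.len lines
  | i :: rest =>
    let line := PySem.List.pyGetD lines i ""  -- lines[index]; index always in range here
    if (!(line == "")) && !(PySem.Str.startswith line " ") && PySem.Str.endswith line ":"
    then i else aEnd lines rest

def find_top_level_section (lines : List String) (section_name : String) : Int × Int :=
  let start := aStart section_name (PySem.List.enumerate lines 0)
  if start < 0 then (-1, -1)  -- Python raises ValueError here; excluded by Pre_
  else (start, aEnd lines (PySem.List.pyRange start (PySem.List.len lines) 1))

-- ===== PORT B =====
def bHeader (header line : String) : Bool :=
  !(PySem.Str.startswith line " ") && (PySem.Str.strip line == header)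

def bBoundary (line : String) : Bool :=
  (!(line == "")) && !(PySem.Str.startswith line " ") && PySem.Str.endswith line ":"

-- B's single loop runs i from n-1 down to 0: recursing on the tail first processes the
-- later indices first, exactly the reverse iteration; state = (next_boundary, result).
def bLoop (header : String) (n : Int) : List (Int × String) → Int × Option (Int × Int)
  | [] => (n, none)
  | (i, line) :: rest =>
    let s := bLoop header n rest
    let result := if bHeader header line then some (i + 1, s.1) else s.2
    let nb := if bBoundary line then i else s.1
    (nb, result)

def find_top_level_section_alt (lines : List String) (section_name : String) : Int × Int :=
  match (bLoop (section_name ++ ":") (PySem.List.len lines) (PySem.List.enumerate lines 0)).2 with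
  | some p => p
  | none => (-1, -1)  -- Python raises ValueError here; excluded by Pre_

-- ===== PRECONDITION & SPEC =====
-- Pre_ excludes exactly the inputs with no top-level header line, where Python A raises ValueError.
def Pre_find_top_level_section (lines : List String) (section_name : String) : Prop :=
  (lines.any (fun line => !(PySem.Str.startswith line " ") && (PySem.Str.strip line == section_name ++ ":"))) = true

instance (lines : List String) (section_name : String) : Decidable (Pre_find_top_level_section lines section_name) := by unfold Pre_find_top_level_section; infer_instance

def pvWitness_find_top_level_section : List String × String := (["a:", "  x: 1", "b:"], "a")

def Spec_find_top_level_section (lines : List String) (section_name : String) (out : Int × Int) : Prop := out = find_top_level_section_alt lines section_name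
instance (lines : List String) (section_name : String) (out : Int × Int) : Decidable (Spec_find_top_level_section lines section_name out) := by unfold Spec_find_top_level_section; infer_instance

-- ===== CLAIM (what is proved, stated in full; the proofs are below) =====
def Claim_equal_find_top_level_section : Prop := ∀ (lines : List String) (section_name : String), Dom_find_top_level_section lines section_name → Pre_find_top_level_section lines section_name → Spec_find_top_level_section lines section_name (find_top_level_section lines section_name)

-- ===== LEMMAS AND PROOFS =====

-- A's first loop computes the header index as a findIdx?
lemma aStart_eq (section_name : String) (xs : List String) (s0 : Int) :
    aStart section_name (PySem.List.enumerate xs s0) =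
      match xs.findIdx? (bHeader (section_name ++ ":")) with
      | some k => s0 + (k : Int) + 1
      | none => -1 := by
  induction xs generalizing s0 with
  | nil => rw [PySem.List.enumerate_nil]; rfl
  | cons x xs ih =>
    rw [PySem.List.enumerate_cons]
    simp only [aStart, List.findIdx?_cons]
    conv_lhs => rw [Bool.and_comm]
    cases hp : bHeader (section_name ++ ":") x with
    | true => rw [bHeader] at hp; rw [hp, if_pos rfl, if_pos rfl]; simp
    | false =>
      rw [bHeader] at hp
      rw [hp, if_neg Bool.false_ne_true, if_neg Bool.false_ne_true, ih (s0 + 1)]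
      cases xs.findIdx? (bHeader (section_name ++ ":")) with
      | none => rfl
      | some k => simp only [Option.map_some]; push_cast; ring

-- A's second loop = first boundary index ≥ s, as findIdx? on the dropped suffix
lemma aEnd_eq (lines : List String) : ∀ (n s : Nat), lines.length - s = n →
    aEnd lines (PySem.List.pyRange (s : Int) (PySem.List.len lines) 1) =
      (match (lines.drop s).findIdx? bBoundary with
       | some k => ((s + k : Nat) : Int)
       | none => PySem.List.len lines) := by
  intro n
  induction n with
  | zero =>
    intro s hs
    have hle : lines.length ≤ s := by omega
    rw [PySem.List.pyRange_one_eq_nil (by simp [PySem.List.len]; exact_mod_cast hle)]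
    rw [List.drop_eq_nil_of_le hle]
    rfl
  | succ n ih =>
    intro s hs
    have hlt : s < lines.length := by omega
    rw [PySem.List.pyRange_one_cons (by simp [PySem.List.len]; exact_mod_cast hlt)]
    have hget : PySem.List.pyGetD lines (s : Int) "" = lines[s] := by
      rw [PySem.List.pyGetD_natCast]; simp [hlt]
    have hdrop : lines.drop s = lines[s] :: lines.drop (s + 1) := List.drop_eq_getElem_cons hlt
    simp only [aEnd]
    rw [hget, hdrop, List.findIdx?_cons]
    have hcond : ((!(lines[s] == "")) && !(PySem.Str.startswith lines[s] " ") && PySem.Str.endswith lines[s] ":") = bBoundary lines[s] := rfl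
    rw [hcond]
    cases hb : bBoundary lines[s] with
    | true => rw [if_pos rfl, if_pos rfl]; simp
    | false =>
      rw [if_neg Bool.false_ne_true, if_neg Bool.false_ne_true]
      have hc2 : ((s : Int) + 1) = ((s + 1 : Nat) : Int) := by push_cast; ring
      rw [hc2, ih (s + 1) (by omega)]
      cases (lines.drop (s + 1)).findIdx? bBoundary with
      | none => rfl
      | some k => simp only [Option.map_some]; congr 1; omega

-- characterization of B's reverse loop: the boundary accumulator is the first boundary
-- index of the suffix, and the recorded result corresponds to the first header index.
lemma bLoop_eq (header : String) (n : Int) (xs : List String) : ∀ (s0 : Nat),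
    bLoop header n (PySem.List.enumerate xs (s0 : Int)) =
      ((match xs.findIdx? bBoundary with
        | some k => ((s0 + k : Nat) : Int)
        | none => n),
       (match xs.findIdx? (bHeader header) with
        | some k => some (((s0 + k + 1 : Nat) : Int),
            match (xs.drop (k + 1)).findIdx? bBoundary with
            | some j => ((s0 + k + 1 + j : Nat) : Int)
            | none => n)
        | none => none)) := by
  induction xs with
  | nil => intro s0; rw [PySem.List.enumerate_nil]; rfl
  | cons x xs ih =>
    intro s0
    rw [PySem.List.enumerate_cons]
    have hcast : ((s0 : Int) + 1) = ((s0 + 1 : Nat) : Int) := by push_cast; ring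
    simp only [bLoop, hcast, ih (s0 + 1), List.findIdx?_cons]
    rw [Prod.mk.injEq]
    refine ⟨?_, ?_⟩
    · -- boundary accumulator component
      cases hb : bBoundary x with
      | true => rw [if_pos rfl, if_pos rfl]; simp
      | false =>
        rw [if_neg Bool.false_ne_true, if_neg Bool.false_ne_true]
        cases xs.findIdx? bBoundary with
        | none => rfl
        | some k => simp only [Option.map_some]; congr 1; omega
    · -- result component
      cases hh : bHeader header x with
      | true =>
        rw [if_pos rfl, if_pos rfl]; rfl
      | false =>
        rw [if_neg Bool.false_ne_true, if_neg Bool.false_ne_true]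
        cases xs.findIdx? (bHeader header) with
        | none => rfl
        | some k =>
          simp only [Option.map_some, List.drop_succ_cons]
          cases (xs.drop (k + 1)).findIdx? bBoundary with
          | none => simp; omega
          | some j => simp; omega

-- ===== VERDICT (by name: the statement is the Claim_ definition above) =====
theorem find_top_level_section_spec : Claim_equal_find_top_level_section := by
  intro lines section_name _hdom _hpre
  unfold Spec_find_top_level_section
  have hA := aStart_eq section_name lines 0
  have hB := bLoop_eq (section_name ++ ":") (PySem.List.len lines) lines 0
  simp only [Nat.cast_zero] at hB
  simp only [find_top_level_section, find_top_level_section_alt]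
  cases hfi : lines.findIdx? (bHeader (section_name ++ ":")) with
  | none =>
    rw [hfi] at hA hB
    simp only at hA hB
    rw [hA, hB, if_pos (by norm_num)]
  | some k =>
    rw [hfi] at hA hB
    simp only [Int.zero_add] at hA
    rw [hA, hB, if_neg (show ¬((k : Int) + 1 < 0) by omega)]
    simp only [Nat.zero_add]
    have hc : ((k : Int) + 1) = ((k + 1 : Nat) : Int) := by push_cast; ring
    rw [hc, aEnd_eq lines (lines.length - (k + 1)) (k + 1) rfl]
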